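-- pv_equiv track=rewrite | github.com/Xer-GWX/VAR-simulator | previous_pipe_省略/NEW.py | tile_number_to_coordinates
-- ===== SOURCE A (Python) =====
-- def tile_number_to_coordinates(grid_size=12):
--     """
--     tile numbers[0,1,2...,143] to coordinates[(0,0)..,(11,11)] .
--     """
--     tile_mapping = {}
--     tile_number = 0
--     for row in range(grid_size):
--         for col in range(grid_size):
--             tile_mapping[tile_number] = (row, col)
--             tile_number += 1
--     return tile_mapping
-- ===== SOURCE B (Python) =====
-- def tile_number_to_coordinates(grid_size=12):
--     """
--     tile numbers[0,1,2...,143] to coordinates[(0,0)..,(11,11)] .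
--     """
--     if grid_size <= 0:
--         return {}
--     return {n: divmod(n, grid_size) for n in range(grid_size * grid_size)}
-- ===== Notes on version B (the rewrite author's own statement) =====
-- stated objective: simpler
-- what changed: Replaces the nested row/col loops with an incrementing counter by a single flat dict comprehension over range(grid_size**2) that derives each coordinate by closed-form arithmetic (divmod).
import Mathlib
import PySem

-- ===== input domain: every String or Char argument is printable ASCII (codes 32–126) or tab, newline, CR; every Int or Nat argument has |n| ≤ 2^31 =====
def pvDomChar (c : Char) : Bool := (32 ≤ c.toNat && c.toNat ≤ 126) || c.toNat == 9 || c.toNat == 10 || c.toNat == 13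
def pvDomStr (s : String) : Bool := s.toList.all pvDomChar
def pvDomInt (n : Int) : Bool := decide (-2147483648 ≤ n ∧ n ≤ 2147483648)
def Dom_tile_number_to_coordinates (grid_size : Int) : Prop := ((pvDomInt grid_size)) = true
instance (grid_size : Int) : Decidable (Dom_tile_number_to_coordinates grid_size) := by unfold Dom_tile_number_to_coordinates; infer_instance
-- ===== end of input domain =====

-- B replaces A's nested row/col loops and running counter by one flat pass computing each
-- coordinate in closed form with divmod; objective: simpler (same asymptotic cost).

-- ===== PORT A =====
-- nested loops over range(grid_size), dict insertion keyed by the running counter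
def tile_number_to_coordinates (grid_size : Int) : List (Int × Int × Int) :=
  (((PySem.List.pyRange 0 grid_size 1).foldl
      (fun (st : PySem.Dict Int (Int × Int) × Int) row =>
        (PySem.List.pyRange 0 grid_size 1).foldl
          (fun st col => (st.1.insert st.2 (row, col), st.2 + 1)) st)
      (PySem.Dict.empty, 0)).1).items

-- ===== PORT B =====
-- one flat comprehension over range(grid_size*grid_size), coordinate = divmod(n, grid_size)
def tile_number_to_coordinates_alt (grid_size : Int) : List (Int × Int × Int) :=
  if grid_size ≤ 0 then []
  else (PySem.List.pyRange 0 (grid_size * grid_size) 1).map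
    (fun n => (n, (PySem.Int.divmod? n grid_size).getD (0, 0)))

-- ===== PRECONDITION & SPEC =====
def Spec_tile_number_to_coordinates (grid_size : Int) (out : List (Int × Int × Int)) : Prop := out = tile_number_to_coordinates_alt grid_size
instance (grid_size : Int) (out : List (Int × Int × Int)) : Decidable (Spec_tile_number_to_coordinates grid_size out) := by unfold Spec_tile_number_to_coordinates; infer_instance

-- ===== CLAIM (what is proved, stated in full; the proofs are below) =====
def Claim_equal_tile_number_to_coordinates : Prop := ∀ (grid_size : Int), Dom_tile_number_to_coordinates grid_size → Spec_tile_number_to_coordinates grid_size (tile_number_to_coordinates grid_size)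

-- ===== LEMMAS AND PROOFS =====

-- items contributed by one inner loop starting at counter value t
def pvRowItems (f : Int → Int × Int) : List Int → Int → List (Int × Int × Int)
  | [], _ => []
  | c :: L, t => (t, f c) :: pvRowItems f L (t + 1)

theorem pvRowItems_append (f : Int → Int × Int) (L : List Int) (c : Int) :
    ∀ t : Int, pvRowItems f (L ++ [c]) t = pvRowItems f L t ++ [(t + L.length, f c)] := by
  induction L with
  | nil => intro t; simp [pvRowItems]
  | cons x L ih =>
      intro t
      simp only [List.cons_append, pvRowItems, ih (t + 1), List.length_cons]
      push_cast
      ring_nf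

theorem pvRowItems_pyRange (f : Int → Int × Int) (m : Nat) (t : Int) :
    pvRowItems f (PySem.List.pyRange 0 (m : Int) 1) t
      = (PySem.List.pyRange t (t + (m : Int)) 1).map (fun n => (n, f (n - t))) := by
  induction m with
  | zero =>
      simp [PySem.List.pyRange_one_eq_nil, pvRowItems]
  | succ m ih =>
      have h1 : PySem.List.pyRange 0 ((m : Int) + 1) 1
          = PySem.List.pyRange 0 (m : Int) 1 ++ [(m : Int)] :=
        PySem.List.pyRange_one_succ_right (by positivity)
      have h2 : PySem.List.pyRange t (t + ((m : Int) + 1)) 1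
          = PySem.List.pyRange t (t + (m : Int)) 1 ++ [t + (m : Int)] := by
        have := PySem.List.pyRange_one_succ_right (a := t) (b := t + (m : Int)) (by omega)
        rw [← this]; ring_nf
      have hlen : ((PySem.List.pyRange 0 (m : Int) 1).length : Int) = (m : Int) := by
        rw [PySem.List.length_pyRange_one]; simp
      push_cast
      rw [h1, h2, pvRowItems_append, ih, List.map_append, hlen]
      simp

-- the inner loop appends pvRowItems and advances the counter by the list length,
-- provided every existing key is below the counter
theorem pv_inner_fold (f : Int → Int × Int) (L : List Int) :
    ∀ (d : PySem.Dict Int (Int × Int)) (t : Int), (∀ k ∈ d.keys, k < t) →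
      (L.foldl (fun st c => (st.1.insert st.2 (f c), st.2 + 1)) (d, t)).1.items
          = d.items ++ pvRowItems f L t
      ∧ (L.foldl (fun st c => (st.1.insert st.2 (f c), st.2 + 1)) (d, t)).2
          = t + L.length := by
  induction L with
  | nil => intro d t _; simp [pvRowItems]
  | cons c L ih =>
      intro d t hb
      have hnc : d.contains t = false := by
        rw [PySem.Dict.contains_eq_decide_mem_keys]
        simp only [decide_eq_false_iff_not]
        intro hmem
        exact absurd (hb t hmem) (by omega)
      have hins : (d.insert t (f c)).items = d.items ++ [(t, f c)] := by
        rw [PySem.Dict.items_insert, hnc]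
        simp
      have hb' : ∀ k ∈ (d.insert t (f c)).keys, k < t + 1 := by
        intro k hk
        rcases (PySem.Dict.mem_keys_insert d t k (f c)).mp hk with h | h
        · omega
        · have := hb k h; omega
      have := ih (d.insert t (f c)) (t + 1) hb'
      simp only [List.foldl_cons]
      refine ⟨?_, ?_⟩
      · rw [this.1, hins, pvRowItems]
        simp
      · rw [this.2]; simp only [List.length_cons]; push_cast; omega
  
-- the intended per-tile value
def pvF (g : Int) (n : Int) : Int × Int × Int := (n, (Int.fdiv n g, Int.fmod n g))

theorem pv_fdiv_fmod (g m n : Int) (hg : 0 < g) (h1 : m * g ≤ n) (h2 : n < m * g + g) :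
    Int.fdiv n g = m ∧ Int.fmod n g = n - m * g := by
  have hc1 : 0 ≤ n - m * g := by omega
  have hc2 : n - m * g < g := by omega
  have hn : n = (n - m * g) + m * g := by ring
  have hdiv : Int.fdiv n g = m := by
    rw [Int.fdiv_eq_ediv, if_pos (Or.inl (le_of_lt hg)), hn,
      Int.add_mul_ediv_right _ _ (by omega : g ≠ 0),
      Int.ediv_eq_zero_of_lt hc1 hc2]
    omega
  refine ⟨hdiv, ?_⟩
  rw [Int.fmod_def, hdiv]
  ring

-- after m rows the dict's items are exactly the first m*g tiles and the counter is m*g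
theorem pv_outer_fold (g : Int) (hg : 0 < g) (m : Nat) :
    (((PySem.List.pyRange 0 (m : Int) 1).foldl
        (fun (st : PySem.Dict Int (Int × Int) × Int) row =>
          (PySem.List.pyRange 0 g 1).foldl
            (fun st col => (st.1.insert st.2 (row, col), st.2 + 1)) st)
        (PySem.Dict.empty, 0)).1).items
        = (PySem.List.pyRange 0 ((m : Int) * g) 1).map (pvF g)
    ∧ ((PySem.List.pyRange 0 (m : Int) 1).foldl
        (fun (st : PySem.Dict Int (Int × Int) × Int) row =>
          (PySem.List.pyRange 0 g 1).foldl
            (fun st col => (st.1.insert st.2 (row, col), st.2 + 1)) st)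
        (PySem.Dict.empty, 0)).2
        = (m : Int) * g := by
  induction m with
  | zero =>
      simp [PySem.List.pyRange_one_eq_nil, PySem.Dict.empty]
  | succ m ih =>
      have h1 : PySem.List.pyRange 0 ((m : Int) + 1) 1
          = PySem.List.pyRange 0 (m : Int) 1 ++ [(m : Int)] :=
        PySem.List.pyRange_one_succ_right (by positivity)
      set D := ((PySem.List.pyRange 0 (m : Int) 1).foldl
        (fun (st : PySem.Dict Int (Int × Int) × Int) row =>
          (PySem.List.pyRange 0 g 1).foldl
            (fun st col => (st.1.insert st.2 (row, col), st.2 + 1)) st)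
        (PySem.Dict.empty, 0)) with hD
      have hbound : ∀ k ∈ D.1.keys, k < (m : Int) * g := by
        intro k hk
        have hkeys : D.1.keys = (PySem.List.pyRange 0 ((m : Int) * g) 1).map
            (fun p => p) := by
          have : D.1.keys = ((PySem.List.pyRange 0 ((m : Int) * g) 1).map (pvF g)).map (·.1) := by
            simp only [PySem.Dict.keys, ih.1]
          rw [this, List.map_map]
          rfl
        rw [hkeys, List.map_id'] at hk
        exact (PySem.List.mem_pyRange_one.mp hk).2
      have hinner := pv_inner_fold (fun c => ((m : Int), c)) (PySem.List.pyRange 0 g 1)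
        D.1 D.2 (by rw [ih.2]; exact hbound)
      have hglen : ((PySem.List.pyRange 0 g 1).length : Int) = g := by
        rw [PySem.List.length_pyRange_one]
        simp [Int.toNat_of_nonneg (le_of_lt hg)]
      have hgnat : ((g.toNat : Int)) = g := Int.toNat_of_nonneg (le_of_lt hg)
      have hrow : pvRowItems (fun c => ((m : Int), c)) (PySem.List.pyRange 0 g 1) ((m : Int) * g)
          = (PySem.List.pyRange ((m : Int) * g) ((m : Int) * g + g) 1).map
              (fun n => (n, ((m : Int), n - (m : Int) * g))) := by
        have := pvRowItems_pyRange (fun c => ((m : Int), c)) g.toNat ((m : Int) * g)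
        rw [hgnat] at this
        exact this
      have hseg : (PySem.List.pyRange ((m : Int) * g) ((m : Int) * g + g) 1).map
              (fun n => (n, ((m : Int), n - (m : Int) * g)))
          = (PySem.List.pyRange ((m : Int) * g) ((m : Int) * g + g) 1).map (pvF g) := by
        apply List.map_congr_left
        intro n hn
        have hn' := PySem.List.mem_pyRange_one.mp hn
        have := pv_fdiv_fmod g (m : Int) n hg hn'.1 (by omega)
        simp [pvF, this.1, this.2]
      have hsplit : PySem.List.pyRange 0 (((m : Int) + 1) * g) 1
          = PySem.List.pyRange 0 ((m : Int) * g) 1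
            ++ PySem.List.pyRange ((m : Int) * g) ((m : Int) * g + g) 1 := by
        have h := PySem.List.pyRange_one_append 0 ((m : Int) * g) (((m : Int) + 1) * g)
          (by positivity) (by nlinarith)
        rw [h]
        congr 1
        ring_nf
      push_cast
      rw [h1, List.foldl_append]
      simp only [List.foldl_cons, List.foldl_nil, ← hD]
      constructor
      · rw [hinner.1, ih.2, ih.1, hrow, hseg, hsplit, List.map_append]
      · rw [hinner.2, ih.2, hglen]; ring

-- ===== VERDICT (by name: the statement is the Claim_ definition above) =====
theorem tile_number_to_coordinates_spec : Claim_equal_tile_number_to_coordinates := by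
  intro g _
  unfold Spec_tile_number_to_coordinates tile_number_to_coordinates tile_number_to_coordinates_alt
  by_cases hg : g ≤ 0
  · rw [if_pos hg, PySem.List.pyRange_one_eq_nil (by omega)]
    simp [PySem.Dict.empty]
  · rw [if_neg hg]
    have hg' : 0 < g := by omega
    have hgnat : ((g.toNat : Int)) = g := Int.toNat_of_nonneg (le_of_lt hg')
    have h := pv_outer_fold g hg' g.toNat
    rw [hgnat] at h
    rw [h.1]
    apply List.map_congr_left
    intro n hn
    have hne : ¬ g = 0 := by omega
    simp [pvF, PySem.Int.divmod?, hne]
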